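-- pv_equiv track=rewrite | github.com/apoorv-11/SIH25001 | main.py | find_best_hotspot_key
-- ===== SOURCE A (Python) =====
-- from typing import Optional
--
-- def find_best_hotspot_key(query: str, hotspot_keys: list[str]) -> Optional[str]:
--     """Try to match query to one of the hotspot keys:
--        1) exact (case-insensitive)
--        2) hotspot contains query substring
--        3) query contains hotspot substring
--        returns canonical hotspot key or None.
--     """
--     if not query:
--         return None
--     q = query.lower().strip()
--     # exact match
--     for k in hotspot_keys:
--         if k.lower() == q:
--             return k
--     # hotspot contains query
--     for k in hotspot_keys:
--         if q in k.lower():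
--             return k
--     # query contains hotspot
--     for k in hotspot_keys:
--         if k.lower() in q:
--             return k
--     return None
-- ===== SOURCE B (Python) =====
-- from typing import Optional
--
-- def find_best_hotspot_key(query: str, hotspot_keys: list[str]) -> Optional[str]:
--     """Single pass: return immediately on an exact match (rank 0); otherwise
--     remember the first key of the lowest rank seen (1 = hotspot contains
--     query, 2 = query contains hotspot), only testing ranks that could still
--     improve the current best."""
--     if not query:
--         return None
--     q = query.lower().strip()
--     best, best_rank = None, 3
--     for k in hotspot_keys:
--         kl = k.lower()
--         if kl == q:
--             return k
--         if best_rank > 1 and q in kl: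
--             best, best_rank = k, 1
--         elif best_rank > 2 and kl in q:
--             best, best_rank = k, 2
--     return best
-- ===== Notes on version B (the rewrite author's own statement) =====
-- stated objective: alternative
-- what changed: Replaces A's three sequential scans (exact, hotspot-contains-query, query-contains-hotspot) by a single pass that returns immediately on an exact match and otherwise keeps the first key of the lowest priority rank seen, testing a rank only while it could still improve the current best.
import Mathlib
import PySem

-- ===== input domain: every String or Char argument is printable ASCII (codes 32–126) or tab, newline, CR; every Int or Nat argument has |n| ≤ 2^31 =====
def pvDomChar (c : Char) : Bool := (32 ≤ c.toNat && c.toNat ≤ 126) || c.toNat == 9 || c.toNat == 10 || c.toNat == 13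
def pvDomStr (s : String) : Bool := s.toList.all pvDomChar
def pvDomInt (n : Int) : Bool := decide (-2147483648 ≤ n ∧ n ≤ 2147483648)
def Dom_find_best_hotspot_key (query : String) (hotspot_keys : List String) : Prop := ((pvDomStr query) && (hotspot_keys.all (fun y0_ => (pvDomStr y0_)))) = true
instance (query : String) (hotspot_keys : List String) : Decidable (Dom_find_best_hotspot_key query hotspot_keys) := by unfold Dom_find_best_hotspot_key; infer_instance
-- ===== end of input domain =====

-- B replaces A's three sequential scans by one pass that tracks the best
-- (lowest) priority rank seen so far (objective: alternative decomposition).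

-- ===== PORT A =====
def find_best_hotspot_key (query : String) (hotspot_keys : List String) : Option String :=
  if query = "" then none
  else
    let q := PySem.Str.strip (PySem.Str.lower query)
    match hotspot_keys.find? (fun k => PySem.Str.lower k == q) with
    | some k => some k
    | none =>
      match hotspot_keys.find? (fun k => PySem.Str.isIn q (PySem.Str.lower k)) with
      | some k => some k
      | none =>
        match hotspot_keys.find? (fun k => PySem.Str.isIn (PySem.Str.lower k) q) with
        | some k => some k
        | none => none

-- ===== PORT B =====
-- Source B's loop: early return on an exact match, otherwise track (best, best_rank),
-- testing a rank only while it could still improve the current best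
def pvLoopB (q : String) : List String → Option String → Nat → Option String
  | [], best, _ => best
  | k :: t, best, br =>
    let kl := PySem.Str.lower k
    if kl == q then some k
    else if br > 1 && PySem.Str.isIn q kl then pvLoopB q t (some k) 1
    else if br > 2 && PySem.Str.isIn kl q then pvLoopB q t (some k) 2
    else pvLoopB q t best br

def find_best_hotspot_key_alt (query : String) (hotspot_keys : List String) : Option String :=
  if query = "" then none
  else
    let q := PySem.Str.strip (PySem.Str.lower query)
    pvLoopB q hotspot_keys none 3

-- ===== PRECONDITION & SPEC =====
def Spec_find_best_hotspot_key (query : String) (hotspot_keys : List String) (out : Option String) : Prop := out = find_best_hotspot_key_alt query hotspot_keys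
instance (query : String) (hotspot_keys : List String) (out : Option String) : Decidable (Spec_find_best_hotspot_key query hotspot_keys out) := by unfold Spec_find_best_hotspot_key; infer_instance

-- ===== CLAIM (what is proved, stated in full; the proofs are below) =====
def Claim_equal_find_best_hotspot_key : Prop := ∀ (query : String) (hotspot_keys : List String), Dom_find_best_hotspot_key query hotspot_keys → Spec_find_best_hotspot_key query hotspot_keys (find_best_hotspot_key query hotspot_keys)

-- ===== LEMMAS AND PROOFS =====

theorem pvLoopB1 (q : String) (l : List String) (b : Option String) :
    pvLoopB q l b 1 =
      match l.find? (fun k => PySem.Str.lower k == q) with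
      | some k => some k
      | none => b := by
  induction l generalizing b with
  | nil => rfl
  | cons k t ih =>
    by_cases h0 : PySem.Str.lower k == q
    · simp [pvLoopB, h0, List.find?]
    · simp [pvLoopB, h0, List.find?, ih]

theorem pvLoopB2 (q : String) (l : List String) (b : Option String) :
    pvLoopB q l b 2 =
      match l.find? (fun k => PySem.Str.lower k == q) with
      | some k => some k
      | none =>
        match l.find? (fun k => PySem.Str.isIn q (PySem.Str.lower k)) with
        | some k => some k
        | none => b := by
  induction l generalizing b with
  | nil => rfl
  | cons k t ih =>
    by_cases h0 : PySem.Str.lower k == q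
    · simp [pvLoopB, h0, List.find?]
    · by_cases h1 : PySem.Chars.isIn q.toList (PySem.Chars.lower k.toList)
      · simp [pvLoopB, h0, h1, List.find?, pvLoopB1]
      · simp [pvLoopB, h0, h1, List.find?, ih]

theorem pvLoopB3 (q : String) (l : List String) (b : Option String) :
    pvLoopB q l b 3 =
      match l.find? (fun k => PySem.Str.lower k == q) with
      | some k => some k
      | none =>
        match l.find? (fun k => PySem.Str.isIn q (PySem.Str.lower k)) with
        | some k => some k
        | none =>
          match l.find? (fun k => PySem.Str.isIn (PySem.Str.lower k) q) with
          | some k => some k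
          | none => b := by
  induction l generalizing b with
  | nil => rfl
  | cons k t ih =>
    by_cases h0 : PySem.Str.lower k == q
    · simp [pvLoopB, h0, List.find?]
    · by_cases h1 : PySem.Chars.isIn q.toList (PySem.Chars.lower k.toList)
      · simp [pvLoopB, h0, h1, List.find?, pvLoopB1]
      · by_cases h2 : PySem.Chars.isIn (PySem.Chars.lower k.toList) q.toList
        · simp [pvLoopB, h0, h1, h2, List.find?, pvLoopB2]
        · simp [pvLoopB, h0, h1, h2, List.find?, ih]

-- ===== VERDICT (by name: the statement is the Claim_ definition above) =====
theorem find_best_hotspot_key_spec : Claim_equal_find_best_hotspot_key := by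
  intro query hotspot_keys _
  unfold Spec_find_best_hotspot_key find_best_hotspot_key find_best_hotspot_key_alt
  by_cases hq : query = ""
  · simp [hq]
  · simp only [hq, if_false]
    rw [pvLoopB3]
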